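-- pv_equiv track=rewrite | github.com/jfisteus/eyegrade | src/eyegrade/utils.py | decode_model
-- ===== SOURCE A (Python) =====
-- def decode_model(bit_list):
--     """Given the bits that encode the model, returns the associated letter.
--
--        It decoding/checksum fails, None is returned. The list of bits must
--        be a list of boolean variables.
--
--     """
--     # x3 = x0 ^ x1 ^ not x2; x0-x3 == x4-x7 == x8-x11 == ...
--     valid = False
--     if len(bit_list) == 3:
--         valid = True
--     elif len(bit_list) >= 4:
--         if (bit_list[3] == bit_list[0] ^ bit_list[1] ^ (not bit_list[2])):
--             valid = True
--             for i in range(4, len(bit_list)):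
--                 if bit_list[i] != bit_list[i - 4]:
--                     valid = False
--                     break
--     if valid:
--         return chr(65 + bit_list[0] | bit_list[1] << 1 | bit_list[2] << 2)
--     else:
--         return None
-- ===== SOURCE B (Python) =====
-- def decode_model(bit_list):
--     n = len(bit_list)
--     if n < 3:
--         return None
--     b0, b1, b2 = bit_list[0], bit_list[1], bit_list[2]
--     base = [b0, b1, b2, b0 ^ b1 ^ (not b2)]
--     expected = (base * (n // 4 + 1))[:n]
--     if bit_list == expected:
--         return chr(65 + b0 | b1 << 1 | b2 << 2)
--     return None
-- ===== Notes on version B (the rewrite author's own statement) =====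
-- stated objective: simpler
-- what changed: Replaces A's checksum test plus index-chasing periodicity loop with break by constructing the canonical repeated 4-bit pattern once and comparing it to the input in a single equality; the len==3 special case disappears because the truncated pattern coincides with the input there.
import Mathlib
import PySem

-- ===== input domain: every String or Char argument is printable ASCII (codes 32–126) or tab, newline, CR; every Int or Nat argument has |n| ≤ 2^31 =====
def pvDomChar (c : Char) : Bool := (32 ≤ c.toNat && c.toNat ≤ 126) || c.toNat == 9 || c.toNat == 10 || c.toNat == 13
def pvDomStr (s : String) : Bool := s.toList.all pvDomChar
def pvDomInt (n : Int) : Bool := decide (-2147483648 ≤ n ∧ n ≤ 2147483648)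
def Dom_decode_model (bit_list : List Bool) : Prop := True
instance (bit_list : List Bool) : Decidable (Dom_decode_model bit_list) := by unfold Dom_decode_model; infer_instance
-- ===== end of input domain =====

-- B validates by building the canonical repeated pattern and comparing (one equality) instead of A's
-- checksum test + periodicity loop; same return value everywhere (objective: simpler).

-- ===== PORT A =====
-- for i in range(4, len(bit_list)): if bit_list[i] != bit_list[i-4]: valid=False; break
-- (indices are always in range, so List.getD is exact here)
def decode_model_loop (bit_list : List Bool) (n i : Nat) : Bool :=
  if _h : i < n then
    if bit_list.getD i false != bit_list.getD (i - 4) false then false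
    else decode_model_loop bit_list n (i + 1)
  else true
termination_by n - i

def decode_model (bit_list : List Bool) : Option String :=
  let n := bit_list.length
  let valid : Bool :=
    if n = 3 then true
    else if 4 ≤ n then
      if bit_list.getD 3 false
          = xor (xor (bit_list.getD 0 false) (bit_list.getD 1 false)) (!(bit_list.getD 2 false))
      then decode_model_loop bit_list n 4
      else false
    else false
  if valid then
    -- chr(65 + b0 | b1 << 1 | b2 << 2): '+' binds tighter than '|'
    some (String.mk [Char.ofNat ((65 + (bit_list.getD 0 false).toNat)
        ||| ((bit_list.getD 1 false).toNat <<< 1) ||| ((bit_list.getD 2 false).toNat <<< 2))])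
  else none

-- ===== PORT B =====
def decode_model_alt (bit_list : List Bool) : Option String :=
  match bit_list with
  | b0 :: b1 :: b2 :: _ =>
    let n := bit_list.length
    let base := [b0, b1, b2, xor (xor b0 b1) (!b2)]
    let expected := (List.replicate (n / 4 + 1) base).flatten.take n
    if bit_list = expected then
      some (String.mk [Char.ofNat ((65 + b0.toNat) ||| (b1.toNat <<< 1) ||| (b2.toNat <<< 2))])
    else none
  | _ => none

-- ===== PRECONDITION & SPEC =====
def Spec_decode_model (bit_list : List Bool) (out : Option String) : Prop := out = decode_model_alt bit_list
instance (bit_list : List Bool) (out : Option String) : Decidable (Spec_decode_model bit_list out) := by unfold Spec_decode_model; infer_instance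

-- ===== CLAIM (what is proved, stated in full; the proofs are below) =====
def Claim_equal_decode_model : Prop := ∀ (bit_list : List Bool), Dom_decode_model bit_list → Spec_decode_model bit_list (decode_model bit_list)

-- ===== LEMMAS AND PROOFS =====

-- length of flatten of replicate
theorem pv_flat_len (p : List Bool) (k : Nat) :
    ((List.replicate k p).flatten).length = k * p.length := by
  induction k with
  | zero => simp
  | succ k ih => simp [List.replicate_succ, ih]; ring

-- getD after take, in range
theorem pv_getD_take (l : List Bool) (d : Bool) (n j : Nat) (h : j < n) :
    (l.take n).getD j d = l.getD j d := by
  simp [List.getD_eq_getElem?_getD, h]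

theorem flatten_replicate_getD (p : List Bool) (hp : p.length = 4) (k j : Nat) (hj : j < 4 * k) :
    ((List.replicate k p).flatten).getD j false = p.getD (j % 4) false := by
  induction k generalizing j with
  | zero => omega
  | succ k ih =>
    rw [List.replicate_succ, List.flatten_cons]
    by_cases h4 : j < 4
    · rw [List.getD_append _ _ _ _ (by omega), Nat.mod_eq_of_lt h4]
    · rw [List.getD_append_right _ _ _ _ (by omega), hp]
      have h1 : (j - 4) % 4 = j % 4 := by omega
      rw [ih (j - 4) (by omega), h1]

theorem loop_iff (bit_list : List Bool) (n : Nat) :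
    ∀ k i, n - i = k →
      (decode_model_loop bit_list n i = true ↔
        ∀ j, i ≤ j → j < n → bit_list.getD j false = bit_list.getD (j - 4) false) := by
  intro k
  induction k with
  | zero =>
    intro i hk
    have h : ¬ i < n := by omega
    rw [decode_model_loop]
    simp only [h, dite_false]
    constructor
    · intro _ j h1 h2; omega
    · intro _; trivial
  | succ k ih =>
    intro i hk
    have h : i < n := by omega
    rw [decode_model_loop]
    simp only [h, dite_true]
    by_cases he : bit_list.getD i false = bit_list.getD (i - 4) false
    · have hb : (bit_list.getD i false != bit_list.getD (i - 4) false) = false :=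
        bne_eq_false_iff_eq.mpr he
      rw [hb]
      simp only [Bool.false_eq_true, if_false]
      rw [ih (i + 1) (by omega)]
      constructor
      · intro H j h1 h2
        rcases Nat.eq_or_lt_of_le h1 with rfl | hlt
        · exact he
        · exact H j hlt h2
      · intro H j h1 h2; exact H j (by omega) h2
    · have hb : (bit_list.getD i false != bit_list.getD (i - 4) false) = true :=
        bne_iff_ne.mpr he
      rw [hb]
      simp only [if_true]
      constructor
      · intro h'; exact absurd h' (by decide)
      · intro H; exact absurd (H i le_rfl h) he

-- pointwise characterisation of "bit_list equals the truncated repeated pattern"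
theorem pv_eq_expected_iff (l base : List Bool) (hb : base.length = 4) :
    l = ((List.replicate (l.length / 4 + 1) base).flatten).take l.length ↔
      ∀ i, i < l.length → l.getD i false = base.getD (i % 4) false := by
  set n := l.length with hndef
  have hk : n ≤ 4 * (n / 4 + 1) := by omega
  have hflen : ((List.replicate (n / 4 + 1) base).flatten).length = (n / 4 + 1) * 4 := by
    rw [pv_flat_len, hb]
  have hlen : (((List.replicate (n / 4 + 1) base).flatten).take n).length = n := by
    rw [List.length_take, hflen]; omega
  constructor
  · intro hEq i hi
    conv_lhs => rw [hEq]
    rw [pv_getD_take _ _ _ _ hi, flatten_replicate_getD base hb _ i (by omega)]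
  · intro H
    apply List.ext_getElem (by rw [hlen])
    intro i h1 h2
    have hi : i < n := h1
    have := H i hi
    rw [List.getD_eq_getElem l false h1] at this
    rw [this]
    have : (((List.replicate (n / 4 + 1) base).flatten).take n).getD i false
        = base.getD (i % 4) false := by
      rw [pv_getD_take _ _ _ _ hi, flatten_replicate_getD base hb _ i (by omega)]
    rw [List.getD_eq_getElem _ false h2] at this
    have hm : i % 4 < base.length := by omega
    rw [List.getD_eq_getElem base false hm] at this
    rw [this]
    rw [List.getD_eq_getElem base false hm]

-- checksum + periodicity ↔ pointwise pattern match (streamlined core equivalence)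
theorem pv_main_iff (b0 b1 b2 b3 : Bool) (rest : List Bool) :
    (b3 = xor (xor b0 b1) (!b2) ∧
      ∀ j, 4 ≤ j → j < (b0 :: b1 :: b2 :: b3 :: rest).length →
        (b0 :: b1 :: b2 :: b3 :: rest).getD j false
          = (b0 :: b1 :: b2 :: b3 :: rest).getD (j - 4) false) ↔
      ∀ i, i < (b0 :: b1 :: b2 :: b3 :: rest).length →
        (b0 :: b1 :: b2 :: b3 :: rest).getD i false
          = [b0, b1, b2, xor (xor b0 b1) (!b2)].getD (i % 4) false := by
  set l := b0 :: b1 :: b2 :: b3 :: rest with hl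
  set base := [b0, b1, b2, xor (xor b0 b1) (!b2)] with hbase
  constructor
  · rintro ⟨hc, hper⟩ i
    induction i using Nat.strong_induction_on with
    | _ i ih =>
      intro hi
      by_cases h4 : i < 4
      · interval_cases i
        · simp [hl, hbase, List.getD]
        · simp [hl, hbase, List.getD]
        · simp [hl, hbase, List.getD]
        · simpa [hl, hbase, List.getD] using hc
      · have h1 : (i - 4) % 4 = i % 4 := by omega
        rw [hper i (by omega) hi, ih (i - 4) (by omega) (by omega), h1]
  · intro H
    constructor
    · have h3 : (3 : Nat) < l.length := by simp [hl]
      have := H 3 h3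
      simpa [hl, hbase, List.getD] using this
    · intro j hj hjn
      have h1 : (j - 4) % 4 = j % 4 := by omega
      rw [H j hjn, H (j - 4) (by omega), h1]

-- ===== VERDICT (by name: the statement is the Claim_ definition above) =====
theorem decode_model_spec : Claim_equal_decode_model := by
  intro bit_list _
  unfold Spec_decode_model
  rcases bit_list with _ | ⟨b0, _ | ⟨b1, _ | ⟨b2, _ | ⟨b3, rest⟩⟩⟩⟩
  · simp [decode_model, decode_model_alt]
  · simp [decode_model, decode_model_alt]
  · simp [decode_model, decode_model_alt]
  · simp [decode_model, decode_model_alt, List.getD]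
  · have hlen : (b0 :: b1 :: b2 :: b3 :: rest).length = rest.length + 4 := by simp
    have h3 : ¬ (b0 :: b1 :: b2 :: b3 :: rest).length = 3 := by omega
    have h4 : 4 ≤ (b0 :: b1 :: b2 :: b3 :: rest).length := by omega
    have e0 : (b0 :: b1 :: b2 :: b3 :: rest).getD 0 false = b0 := rfl
    have e1 : (b0 :: b1 :: b2 :: b3 :: rest).getD 1 false = b1 := rfl
    have e2 : (b0 :: b1 :: b2 :: b3 :: rest).getD 2 false = b2 := rfl
    have e3 : (b0 :: b1 :: b2 :: b3 :: rest).getD 3 false = b3 := rfl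
    have hiff : ((b3 = xor (xor b0 b1) (!b2)) ∧
        decode_model_loop (b0 :: b1 :: b2 :: b3 :: rest) (b0 :: b1 :: b2 :: b3 :: rest).length 4 = true)
        ↔ (b0 :: b1 :: b2 :: b3 :: rest)
          = ((List.replicate ((b0 :: b1 :: b2 :: b3 :: rest).length / 4 + 1)
              [b0, b1, b2, xor (xor b0 b1) (!b2)]).flatten).take
              (b0 :: b1 :: b2 :: b3 :: rest).length := by
      rw [pv_eq_expected_iff _ _ (by simp), ← pv_main_iff b0 b1 b2 b3 rest]
      constructor
      · rintro ⟨hc, hL⟩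
        exact ⟨hc, (loop_iff (b0 :: b1 :: b2 :: b3 :: rest) (b0 :: b1 :: b2 :: b3 :: rest).length
          ((b0 :: b1 :: b2 :: b3 :: rest).length - 4) 4 rfl).mp hL⟩
      · rintro ⟨hc, hper⟩
        exact ⟨hc, (loop_iff (b0 :: b1 :: b2 :: b3 :: rest) (b0 :: b1 :: b2 :: b3 :: rest).length
          ((b0 :: b1 :: b2 :: b3 :: rest).length - 4) 4 rfl).mpr hper⟩
    simp only [decode_model, decode_model_alt, e0, e1, e2, e3]
    rw [if_neg h3, if_pos h4]
    by_cases hb3 : b3 = xor (xor b0 b1) (!b2)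
    · rw [if_pos hb3]
      by_cases hL : decode_model_loop (b0 :: b1 :: b2 :: b3 :: rest)
          (b0 :: b1 :: b2 :: b3 :: rest).length 4 = true
      · rw [if_pos hL, if_pos (hiff.mp ⟨hb3, hL⟩)]
      · have hne : ¬ (b0 :: b1 :: b2 :: b3 :: rest)
            = ((List.replicate ((b0 :: b1 :: b2 :: b3 :: rest).length / 4 + 1)
                [b0, b1, b2, xor (xor b0 b1) (!b2)]).flatten).take
                (b0 :: b1 :: b2 :: b3 :: rest).length :=
          fun hE => hL (hiff.mpr hE).2
        rw [if_neg hL, if_neg hne]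
    · rw [if_neg hb3]
      have hne : ¬ (b0 :: b1 :: b2 :: b3 :: rest)
          = ((List.replicate ((b0 :: b1 :: b2 :: b3 :: rest).length / 4 + 1)
              [b0, b1, b2, xor (xor b0 b1) (!b2)]).flatten).take
              (b0 :: b1 :: b2 :: b3 :: rest).length :=
        fun hE => hb3 (hiff.mpr hE).1
      rw [if_neg hne]
      simp
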